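-- pv_equiv track=rewrite | github.com/Ricksou/Python_L3 | Episode 6.py | InsertEtoile
-- ===== SOURCE A (Python) =====
-- def InsertEtoile(ch):
--     ch1=""
--     for char in ch:
--         if char==ch[-1]:
--             break
--         else:
--             ch1=ch1+char+"*"
--     ch1=ch1+ch[-1]
--     return ch1
-- ===== SOURCE B (Python) =====
-- def InsertEtoile(ch):
--     idx = ch.index(ch[-1])
--     return "*".join(list(ch[:idx]) + [ch[-1]])
-- ===== Notes on version B (the rewrite author's own statement) =====
-- stated objective: simpler
-- what changed: Replaces the scan-with-break loop and repeated string concatenation by a find-then-format decomposition: locate the first occurrence of the last character with str.index, then star-join that prefix together with the last character.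
import Mathlib
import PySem

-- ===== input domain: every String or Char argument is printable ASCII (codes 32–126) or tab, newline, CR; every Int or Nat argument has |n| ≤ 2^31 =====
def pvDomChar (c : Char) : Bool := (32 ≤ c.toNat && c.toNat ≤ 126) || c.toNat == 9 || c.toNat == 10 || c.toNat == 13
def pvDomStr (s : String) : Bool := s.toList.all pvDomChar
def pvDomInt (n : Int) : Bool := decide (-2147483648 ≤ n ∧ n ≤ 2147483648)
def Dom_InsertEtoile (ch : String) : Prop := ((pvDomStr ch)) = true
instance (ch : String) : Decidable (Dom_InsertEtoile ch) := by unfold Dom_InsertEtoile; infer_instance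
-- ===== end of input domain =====

-- B replaces A's scan-with-break loop and repeated concatenation by locating the first
-- occurrence of the last character (index) and star-joining the prefix with it (simpler).


-- ===== PORT A =====
-- the for-loop with break: acc is ch1; stops at the first char equal to `last`
def pvALoop (last : Char) (acc : List Char) : List Char → List Char
  | [] => acc
  | c :: rest => if c == last then acc else pvALoop last (acc ++ [c, '*']) rest

def InsertEtoile (ch : String) : String :=
  match PySem.Str.pyGet? ch (-1) with      -- ch[-1]; none = IndexError on "" (excluded by Pre_)
  | none => ""
  | some last => String.ofList (pvALoop last [] ch.toList ++ [last])

-- ===== PORT B =====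
def InsertEtoile_alt (ch : String) : String :=
  match PySem.Str.pyGet? ch (-1) with      -- ch[-1]; none = IndexError on "" (excluded by Pre_)
  | none => ""
  | some last =>
    -- idx = ch.index(ch[-1]); the last char is in ch, so index? is always some here
    let idx : Nat := (PySem.List.index? ch.toList last).getD 0
    -- "*".join(list(ch[:idx]) + [ch[-1]])
    PySem.Str.join "*"
      ((PySem.List.slice ch.toList none (some (idx : Int))).map (fun c => String.ofList [c])
        ++ [String.ofList [last]])

-- ===== PRECONDITION & SPEC =====
-- Pre_ excludes only the empty string, on which A raises IndexError (ch[-1]).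
def Pre_InsertEtoile (ch : String) : Prop := ch ≠ ""
instance (ch : String) : Decidable (Pre_InsertEtoile ch) := by unfold Pre_InsertEtoile; infer_instance
def pvWitness_InsertEtoile : String := "tests*"

def Spec_InsertEtoile (ch : String) (out : String) : Prop := out = InsertEtoile_alt ch
instance (ch : String) (out : String) : Decidable (Spec_InsertEtoile ch out) := by unfold Spec_InsertEtoile; infer_instance

-- ===== CLAIM (what is proved, stated in full; the proofs are below) =====
def Claim_equal_InsertEtoile : Prop := ∀ (ch : String), Dom_InsertEtoile ch → Pre_InsertEtoile ch → Spec_InsertEtoile ch (InsertEtoile ch)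

-- ===== LEMMAS AND PROOFS =====

-- A's loop over pre ++ x :: suf, with x not in pre, emits "c*" for each c of pre and stops.
lemma pvALoop_eq (x : Char) : ∀ (pre : List Char) (suf acc : List Char), x ∉ pre →
    pvALoop x acc (pre ++ x :: suf) = acc ++ pre.flatMap (fun c => [c, '*'])
  | [], suf, acc, _ => by simp [pvALoop]
  | c :: pre, suf, acc, h => by
    have hc : (c == x) = false := by
      simp only [List.mem_cons, not_or] at h
      exact beq_eq_false_iff_ne.mpr (fun e => h.1 e.symm)
    simp only [List.cons_append, pvALoop, hc, Bool.false_eq_true, if_false]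
    rw [pvALoop_eq x pre suf _ (by simp_all)]
    simp

-- star-joining the singletons of pre together with [x]
lemma join_star_eq (x : Char) : ∀ (pre : List Char),
    PySem.Chars.join ['*'] (pre.map (fun c => [c]) ++ [[x]]) = pre.flatMap (fun c => [c, '*']) ++ [x]
  | [] => by simp [PySem.Chars.join_singleton]
  | c :: pre => by
    have hne : pre.map (fun c => [c]) ++ [[x]] ≠ [] := by simp
    obtain ⟨q, rest, hqr⟩ := List.exists_cons_of_ne_nil hne
    rw [List.map_cons, List.cons_append, hqr, PySem.Chars.join_cons_cons, ← hqr,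
      join_star_eq x pre]
    simp

-- ===== VERDICT (by name: the statement is the Claim_ definition above) =====
theorem InsertEtoile_spec : Claim_equal_InsertEtoile := by
  intro ch _ hpre
  unfold Spec_InsertEtoile InsertEtoile InsertEtoile_alt
  have hl : ch.toList ≠ [] := fun h => hpre (String.toList_eq_nil_iff.mp h)
  have hget : PySem.Str.pyGet? ch (-1) = ch.toList.getLast? := by
    simp [PySem.List.pyGet?_neg_one]
  obtain ⟨x, hx⟩ : ∃ x, ch.toList.getLast? = some x := by
    cases h : ch.toList.getLast? with
    | none => exact absurd (List.getLast?_eq_none_iff.mp h) hl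
    | some x => exact ⟨x, rfl⟩
  rw [hget, hx]
  have hmem : x ∈ ch.toList := List.mem_of_getLast? hx
  obtain ⟨k, hk⟩ : ∃ k, PySem.List.index? ch.toList x = some k := by
    cases h : PySem.List.index? ch.toList x with
    | none => exact absurd ((PySem.List.index?_eq_none_iff _ _).mp h) (by simpa using hmem)
    | some k => exact ⟨k, rfl⟩
  obtain ⟨pre, suf, hsplit, hlen, hnotin⟩ := (PySem.List.index?_eq_some_iff _ _ _).mp hk
  simp only [hk, Option.getD_some]
  rw [PySem.List.slice_to_natCast]
  have htake : ch.toList.take k = pre := by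
    rw [hsplit, ← hlen, List.take_left]
  rw [htake]
  have hjoin : (PySem.Str.join "*" (pre.map (fun c => String.ofList [c]) ++ [String.ofList [x]])).toList
      = pre.flatMap (fun c => [c, '*']) ++ [x] := by
    rw [PySem.Str.toList_join]
    have : (pre.map (fun c => String.ofList [c]) ++ [String.ofList [x]]).map String.toList
        = pre.map (fun c => [c]) ++ [[x]] := by
      simp [List.map_map, Function.comp]
    rw [this]
    exact join_star_eq x pre
  have hloop : pvALoop x [] ch.toList ++ [x] = pre.flatMap (fun c => [c, '*']) ++ [x] := by
    rw [hsplit, pvALoop_eq x pre suf [] hnotin]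
    simp
  have := hjoin.symm
  calc String.ofList (pvALoop x [] ch.toList ++ [x])
      = String.ofList ((PySem.Str.join "*" (pre.map (fun c => String.ofList [c]) ++ [String.ofList [x]])).toList) := by
        rw [hjoin, hloop]
    _ = PySem.Str.join "*" (pre.map (fun c => String.ofList [c]) ++ [String.ofList [x]]) :=
        String.ofList_toList
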